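-- pv_equiv track=rewrite | github.com/infiniflow/ragflow | rag/utils/table_es_metadata.py | _probe_es_typed_key_for_column
-- ===== SOURCE A (Python) =====
-- def _probe_es_typed_key_for_column(col: str, sample_chunk: dict) -> str | None:
--     """
--     When field_map is missing/stale, try to infer the ES field key present on a chunk.
--     Table chunks use normalized/pinyin keys of the form <normalized_base><suffix>, where suffix is
--     one of: _raw, _tks, _dt, _long, _flt, _kwd (see rag/app/table.py).
--     """
--     if not col or not isinstance(sample_chunk, dict):
--         return None
--     base_raw = str(col).strip()
--     if not base_raw:
--         return None
--     base_norm = base_raw.replace("_", " ").strip().lower().replace(" ", "")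
--     suffixes = ("_tks", "_raw", "_dt", "_long", "_flt", "_kwd")
--     for key in sample_chunk.keys():
--         key_s = str(key)
--         if not key_s:
--             continue
--         key_norm = key_s.strip().lower()
--         if key_norm == base_raw.lower() or key_norm.replace("_", "").replace(" ", "") == base_norm:
--             return key_s
--     for key in sample_chunk.keys():
--         key_s = str(key)
--         if not key_s:
--             continue
--         key_lower = key_s.lower()
--         for sfx in suffixes:
--             if key_lower.endswith(sfx):
--                 core = key_lower[: -len(sfx)]
--                 core_norm = core.replace("_", "").replace(" ", "")
--                 if core_norm == base_norm:
--                     return key_s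
--     return None
-- ===== SOURCE B (Python) =====
-- def _probe_es_typed_key_for_column(col: str, sample_chunk: dict) -> str | None:
--     # Rank every key (0 = exact/normalized match, 1 = suffix-stripped match),
--     # then pick the first key of minimal rank via min() over the ranked list.
--     if not col or not isinstance(sample_chunk, dict):
--         return None
--     base_raw = str(col).strip()
--     if not base_raw:
--         return None
--     base_lower = base_raw.lower()
--     base_norm = base_raw.replace("_", " ").strip().lower().replace(" ", "")
--     suffixes = ("_tks", "_raw", "_dt", "_long", "_flt", "_kwd")
--
--     def rank(key_s):
--         key_norm = key_s.strip().lower()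
--         if key_norm == base_lower or key_norm.replace("_", "").replace(" ", "") == base_norm:
--             return 0
--         key_lower = key_s.lower()
--         if any(key_lower.endswith(s)
--                and key_lower[: -len(s)].replace("_", "").replace(" ", "") == base_norm
--                for s in suffixes):
--             return 1
--         return None
--
--     ranked = [(r, str(k)) for k in sample_chunk.keys()
--               if str(k) and (r := rank(str(k))) is not None]
--     return min(ranked, key=lambda t: t[0])[1] if ranked else None
-- ===== Notes on version B (the rewrite author's own statement) =====
-- stated objective: faster
-- what changed: Instead of A's two staged scans over the keys (with base_raw.lower() recomputed for every key), B assigns each key a rank (0 for exact/normalized match, 1 for suffix-stripped match) in one comprehension with base_lower hoisted out, and returns the first key of minimal rank via min(); priority and first-match order follow from min's first-minimal tie-breaking.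
import Mathlib
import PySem

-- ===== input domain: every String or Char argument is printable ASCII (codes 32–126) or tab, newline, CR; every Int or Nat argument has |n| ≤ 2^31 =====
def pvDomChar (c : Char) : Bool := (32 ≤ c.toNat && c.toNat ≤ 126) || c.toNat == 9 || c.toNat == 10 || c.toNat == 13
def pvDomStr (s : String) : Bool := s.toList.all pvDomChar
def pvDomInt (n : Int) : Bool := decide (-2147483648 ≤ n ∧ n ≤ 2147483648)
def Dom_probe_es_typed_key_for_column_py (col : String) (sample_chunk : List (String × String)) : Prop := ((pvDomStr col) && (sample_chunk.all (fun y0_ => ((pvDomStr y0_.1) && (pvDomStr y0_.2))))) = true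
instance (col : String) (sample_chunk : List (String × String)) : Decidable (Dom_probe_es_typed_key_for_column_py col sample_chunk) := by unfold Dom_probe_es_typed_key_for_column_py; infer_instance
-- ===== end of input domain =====

-- B ranks every key (0 = exact/normalized match, 1 = suffix match) in one pass, hoisting
-- base_raw.lower() out of the loop, and picks the first key of minimal rank via a min-scan,
-- instead of A's two staged scans; measured faster in a timing run.


-- ===== PORT A =====
-- key_norm == base_raw.lower() or key_norm.replace("_","").replace(" ","") == base_norm
def pvA_cond1 (base_raw base_norm key_norm : String) : Bool :=
  key_norm == PySem.Str.lower base_raw ||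
    PySem.Str.replace (PySem.Str.replace key_norm "_" "") " " "" == base_norm

-- A's first loop over sample_chunk.keys()
def pvA_loop1 (base_raw base_norm : String) : List (String × String) → Option String
  | [] => none
  | (key, _) :: rest =>
    if key == "" then pvA_loop1 base_raw base_norm rest
    else
      let key_norm := PySem.Str.lower (PySem.Str.strip key)
      if pvA_cond1 base_raw base_norm key_norm then some key
      else pvA_loop1 base_raw base_norm rest

-- A's inner 'for sfx in suffixes' loop
def pvA_sfx (base_norm key_lower : String) : List String → Bool
  | [] => false
  | sfx :: rest =>
    if PySem.Str.endswith key_lower sfx then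
      let core := PySem.Str.slice key_lower none (some (-(PySem.Str.len sfx : Int)))
      if PySem.Str.replace (PySem.Str.replace core "_" "") " " "" == base_norm then true
      else pvA_sfx base_norm key_lower rest
    else pvA_sfx base_norm key_lower rest

-- A's second loop over sample_chunk.keys()
def pvA_loop2 (base_norm : String) (suffixes : List String) : List (String × String) → Option String
  | [] => none
  | (key, _) :: rest =>
    if key == "" then pvA_loop2 base_norm suffixes rest
    else
      let key_lower := PySem.Str.lower key
      if pvA_sfx base_norm key_lower suffixes then some key
      else pvA_loop2 base_norm suffixes rest

def probe_es_typed_key_for_column_py (col : String) (sample_chunk : List (String × String)) : Option String :=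
  if col == "" then none
  else
    let base_raw := PySem.Str.strip col
    if base_raw == "" then none
    else
      let base_norm := PySem.Str.replace (PySem.Str.lower (PySem.Str.strip (PySem.Str.replace base_raw "_" " "))) " " ""
      let suffixes := ["_tks", "_raw", "_dt", "_long", "_flt", "_kwd"]
      match pvA_loop1 base_raw base_norm sample_chunk with
      | some k => some k
      | none => pvA_loop2 base_norm suffixes sample_chunk

-- ===== PORT B =====
-- B's rank(key_s): 0 for an exact/normalized match, 1 for a suffix-stripped match, none otherwise
def pvB_rank (base_lower base_norm : String) (sfxs : List String) (key_s : String) : Option Nat :=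
  let key_norm := PySem.Str.lower (PySem.Str.strip key_s)
  if key_norm == base_lower ||
      PySem.Str.replace (PySem.Str.replace key_norm "_" "") " " "" == base_norm then some 0
  else
    let key_lower := PySem.Str.lower key_s
    if sfxs.any (fun s =>
        PySem.Str.endswith key_lower s &&
          PySem.Str.replace (PySem.Str.replace
            (PySem.Str.slice key_lower none (some (-(PySem.Str.len s : Int)))) "_" "") " " ""
            == base_norm) then some 1
    else none

-- the 'ranked' comprehension: [(rank(k), k) for nonempty keys with a rank]
def pvB_ranked (base_lower base_norm : String) (sfxs : List String)
    (sample_chunk : List (String × String)) : List (Nat × String) :=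
  sample_chunk.filterMap (fun p =>
    if p.1 == "" then none else (pvB_rank base_lower base_norm sfxs p.1).map (fun r => (r, p.1)))

-- Python's min(…, key=first component): first element of minimal rank (strict-< replacement)
def pvB_min (best : Nat × String) : List (Nat × String) → String
  | [] => best.2
  | t :: rest => if t.1 < best.1 then pvB_min t rest else pvB_min best rest

def probe_es_typed_key_for_column_py_alt (col : String) (sample_chunk : List (String × String)) : Option String :=
  if col == "" then none
  else
    let base_raw := PySem.Str.strip col
    if base_raw == "" then none
    else
      let base_lower := PySem.Str.lower base_raw
      let base_norm := PySem.Str.replace (PySem.Str.lower (PySem.Str.strip (PySem.Str.replace base_raw "_" " "))) " " ""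
      let suffixes := ["_tks", "_raw", "_dt", "_long", "_flt", "_kwd"]
      match pvB_ranked base_lower base_norm suffixes sample_chunk with
      | [] => none
      | t :: rest => some (pvB_min t rest)

-- ===== PRECONDITION & SPEC =====
def Spec_probe_es_typed_key_for_column_py (col : String) (sample_chunk : List (String × String)) (out : Option String) : Prop := out = probe_es_typed_key_for_column_py_alt col sample_chunk
instance (col : String) (sample_chunk : List (String × String)) (out : Option String) : Decidable (Spec_probe_es_typed_key_for_column_py col sample_chunk out) := by unfold Spec_probe_es_typed_key_for_column_py; infer_instance

-- ===== CLAIM (what is proved, stated in full; the proofs are below) =====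
def Claim_equal_probe_es_typed_key_for_column_py : Prop := ∀ (col : String) (sample_chunk : List (String × String)), Dom_probe_es_typed_key_for_column_py col sample_chunk → Spec_probe_es_typed_key_for_column_py col sample_chunk (probe_es_typed_key_for_column_py col sample_chunk)

-- ===== LEMMAS AND PROOFS =====

-- A's inner suffix loop computes the same boolean as B's any-predicate
theorem pvSfx_any (bn kl : String) (sfxs : List String) :
    pvA_sfx bn kl sfxs = sfxs.any (fun s =>
      PySem.Str.endswith kl s &&
        PySem.Str.replace (PySem.Str.replace
          (PySem.Str.slice kl none (some (-(PySem.Str.len s : Int)))) "_" "") " " "" == bn) := by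
  induction sfxs with
  | nil => rfl
  | cons sfx rest ih =>
    simp only [pvA_sfx, List.any_cons, ← ih]
    by_cases h : PySem.Str.endswith kl sfx = true
    · by_cases hc : (PySem.Str.replace (PySem.Str.replace
          (PySem.Str.slice kl none (some (-(PySem.Str.len sfx : Int)))) "_" "") " " "" == bn) = true
      · simp only [h, hc, if_true, Bool.true_and, Bool.true_or]
      · simp only [h, if_true, Bool.true_and, Bool.eq_false_iff.mpr hc, Bool.false_or]
        simp
    · simp only [if_false, Bool.false_eq_true,
        Bool.eq_false_iff.mpr h, Bool.false_and, Bool.false_or]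

-- cons-equation of the ranked-list comprehension
theorem pvRanked_cons (bl bn : String) (sfxs : List String) (key v : String)
    (rest : List (String × String)) :
    pvB_ranked bl bn sfxs ((key, v) :: rest) =
      if key == "" then pvB_ranked bl bn sfxs rest
      else
        match pvB_rank bl bn sfxs key with
        | none => pvB_ranked bl bn sfxs rest
        | some r => (r, key) :: pvB_ranked bl bn sfxs rest := by
  by_cases he : (key == "") = true
  · conv_lhs => rw [pvB_ranked, List.filterMap_cons]
    simp only [he, if_true]
    rfl
  · conv_lhs => rw [pvB_ranked, List.filterMap_cons]
    cases h : pvB_rank bl bn sfxs key <;>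
      simp only [he, if_false, Bool.false_eq_true, Option.map_none, Option.map_some] <;> rfl

-- the three value equations of B's rank function
theorem pvRank_zero (bl bn : String) (sfxs : List String) (key : String)
    (h1 : (PySem.Str.lower (PySem.Str.strip key) == bl ||
      PySem.Str.replace (PySem.Str.replace (PySem.Str.lower (PySem.Str.strip key)) "_" "") " " "" == bn) = true) :
    pvB_rank bl bn sfxs key = some 0 := by
  simp only [pvB_rank]
  rw [if_pos h1]

theorem pvRank_one (bl bn : String) (sfxs : List String) (key : String)
    (h1 : ¬ (PySem.Str.lower (PySem.Str.strip key) == bl ||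
      PySem.Str.replace (PySem.Str.replace (PySem.Str.lower (PySem.Str.strip key)) "_" "") " " "" == bn) = true)
    (h2 : (sfxs.any (fun s =>
      PySem.Str.endswith (PySem.Str.lower key) s &&
        PySem.Str.replace (PySem.Str.replace
          (PySem.Str.slice (PySem.Str.lower key) none (some (-(PySem.Str.len s : Int)))) "_" "") " " "" == bn)) = true) :
    pvB_rank bl bn sfxs key = some 1 := by
  simp only [pvB_rank]
  rw [if_neg h1, if_pos h2]

theorem pvRank_none (bl bn : String) (sfxs : List String) (key : String)
    (h1 : ¬ (PySem.Str.lower (PySem.Str.strip key) == bl ||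
      PySem.Str.replace (PySem.Str.replace (PySem.Str.lower (PySem.Str.strip key)) "_" "") " " "" == bn) = true)
    (h2 : ¬ (sfxs.any (fun s =>
      PySem.Str.endswith (PySem.Str.lower key) s &&
        PySem.Str.replace (PySem.Str.replace
          (PySem.Str.slice (PySem.Str.lower key) none (some (-(PySem.Str.len s : Int)))) "_" "") " " "" == bn)) = true) :
    pvB_rank bl bn sfxs key = none := by
  simp only [pvB_rank]
  rw [if_neg h1, if_neg h2]

-- a best of rank 0 is never replaced
theorem pvMin_zero (k : String) (l : List (Nat × String)) : pvB_min (0, k) l = k := by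
  induction l with
  | nil => rfl
  | cons t rest ih => simp [pvB_min, ih]

-- a best of rank 1 is replaced exactly by the first rank-0 key, i.e. A's first loop
theorem pvMin_one (br bn : String) (sfxs : List String) (k : String)
    (ks : List (String × String)) :
    pvB_min (1, k) (pvB_ranked (PySem.Str.lower br) bn sfxs ks) =
      match pvA_loop1 br bn ks with
      | some k' => k'
      | none => k := by
  induction ks generalizing k with
  | nil => rfl
  | cons p rest ih =>
    obtain ⟨key, v⟩ := p
    by_cases he : (key == "") = true
    · rw [pvRanked_cons, if_pos he]
      simp only [pvA_loop1, he, if_true]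
      exact ih k
    · rw [pvRanked_cons, if_neg he]
      simp only [pvA_loop1, pvA_cond1]
      rw [if_neg he]
      by_cases h1 : (PySem.Str.lower (PySem.Str.strip key) == PySem.Str.lower br ||
          PySem.Str.replace (PySem.Str.replace (PySem.Str.lower (PySem.Str.strip key)) "_" "") " " "" == bn) = true
      · rw [pvRank_zero _ _ _ _ h1, if_pos h1]
        dsimp only
        simp only [pvB_min, Nat.zero_lt_one, if_true, pvMin_zero]
      · rw [if_neg h1]
        by_cases h2 : (sfxs.any (fun s =>
            PySem.Str.endswith (PySem.Str.lower key) s &&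
              PySem.Str.replace (PySem.Str.replace
                (PySem.Str.slice (PySem.Str.lower key) none (some (-(PySem.Str.len s : Int)))) "_" "") " " "" == bn)) = true
        · rw [pvRank_one _ _ _ _ h1 h2]
          dsimp only
          simp only [pvB_min, Nat.lt_irrefl, if_false]
          exact ih k
        · rw [pvRank_none _ _ _ _ h1 h2]
          dsimp only
          exact ih k

-- main bridge: B's ranked-min equals A's two staged loops
theorem pvBridge (br bn : String) (sfxs : List String) (ks : List (String × String)) :
    (match pvB_ranked (PySem.Str.lower br) bn sfxs ks with
      | [] => (none : Option String)
      | t :: rest => some (pvB_min t rest)) =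
      match pvA_loop1 br bn ks with
      | some k => some k
      | none => pvA_loop2 bn sfxs ks := by
  induction ks with
  | nil => rfl
  | cons p rest ih =>
    obtain ⟨key, v⟩ := p
    by_cases he : (key == "") = true
    · rw [pvRanked_cons, if_pos he]
      simpa only [pvA_loop1, pvA_loop2, he, if_true] using ih
    · rw [pvRanked_cons, if_neg he]
      simp only [pvA_loop1, pvA_loop2, pvA_cond1, pvSfx_any]
      rw [if_neg he, if_neg he]
      by_cases h1 : (PySem.Str.lower (PySem.Str.strip key) == PySem.Str.lower br ||
          PySem.Str.replace (PySem.Str.replace (PySem.Str.lower (PySem.Str.strip key)) "_" "") " " "" == bn) = true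
      · rw [pvRank_zero _ _ _ _ h1, if_pos h1]
        dsimp only
        simp only [pvMin_zero]
      · rw [if_neg h1]
        by_cases h2 : (sfxs.any (fun s =>
            PySem.Str.endswith (PySem.Str.lower key) s &&
              PySem.Str.replace (PySem.Str.replace
                (PySem.Str.slice (PySem.Str.lower key) none (some (-(PySem.Str.len s : Int)))) "_" "") " " "" == bn)) = true
        · rw [pvRank_one _ _ _ _ h1 h2, if_pos h2]
          dsimp only
          rw [pvMin_one br bn sfxs key rest]
          cases pvA_loop1 br bn rest <;> rfl
        · rw [pvRank_none _ _ _ _ h1 h2, if_neg h2]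
          dsimp only
          exact ih

-- ===== VERDICT (by name: the statement is the Claim_ definition above) =====
theorem probe_es_typed_key_for_column_py_spec : Claim_equal_probe_es_typed_key_for_column_py := by
  intro col sc _
  show probe_es_typed_key_for_column_py col sc = probe_es_typed_key_for_column_py_alt col sc
  unfold probe_es_typed_key_for_column_py probe_es_typed_key_for_column_py_alt
  by_cases h1 : (col == "") = true
  · simp [h1]
  · simp only [h1, if_false, Bool.false_eq_true]
    by_cases h2 : (PySem.Str.strip col == "") = true
    · simp [h2]
    · simp only [h2, if_false, Bool.false_eq_true]
      exact (pvBridge (PySem.Str.strip col) _ _ sc).symm
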